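-- pv_equiv track=rewrite | github.com/pypi-data/pypi-mirror-365 | packages/lego-hqec/lego_hqec-0.1.1.tar.gz/lego_hqec-0.1.1/LEGO_HQEC/OperatorPush/OperatorToolbox.py | elementwise_product
-- ===== SOURCE A (Python) =====
-- def elementwise_product(list1, list2):
--     # Check if the length of the input list is consistent
--     if len(list1) != len(list2):
--         return None  # Inconsistent lengths, unable to element-wise multiply
--
--     # Create an empty list to store the results
--     result = []
--
--     # Define the multiplication rule for Pauli operators
--     product_table = {
--         ('I', 'I'): 'I',
--         ('I', 'X'): 'X',
--         ('I', 'Y'): 'Y',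
--         ('I', 'Z'): 'Z',
--         ('X', 'I'): 'X',
--         ('X', 'X'): 'I',
--         ('X', 'Y'): 'Z',
--         ('X', 'Z'): 'Y',
--         ('Y', 'I'): 'Y',
--         ('Y', 'X'): 'Z',
--         ('Y', 'Y'): 'I',
--         ('Y', 'Z'): 'X',
--         ('Z', 'I'): 'Z',
--         ('Z', 'X'): 'Y',
--         ('Z', 'Y'): 'X',
--         ('Z', 'Z'): 'I',
--     }
--
--     # Multiply element-wise and add the result to the result list
--     for op1, op2 in zip(list1, list2):
--         result.append(product_table[(op1, op2)])
--
--     return result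
-- ===== SOURCE B (Python) =====
-- def elementwise_product(list1, list2):
--     if len(list1) != len(list2):
--         return None
--     enc = {'I': 0, 'X': 1, 'Z': 2, 'Y': 3}
--     dec = 'IXZY'
--     return [dec[enc[op1] ^ enc[op2]] for op1, op2 in zip(list1, list2)]
-- ===== Notes on version B (the rewrite author's own statement) =====
-- stated objective: idiomatic
-- what changed: Replaces the 16-entry Pauli product table with the symplectic encoding I,X,Z,Y -> 0,1,2,3 so each product is computed as a bitwise XOR of the two codes, decoded through a 4-character string.
import Mathlib
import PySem

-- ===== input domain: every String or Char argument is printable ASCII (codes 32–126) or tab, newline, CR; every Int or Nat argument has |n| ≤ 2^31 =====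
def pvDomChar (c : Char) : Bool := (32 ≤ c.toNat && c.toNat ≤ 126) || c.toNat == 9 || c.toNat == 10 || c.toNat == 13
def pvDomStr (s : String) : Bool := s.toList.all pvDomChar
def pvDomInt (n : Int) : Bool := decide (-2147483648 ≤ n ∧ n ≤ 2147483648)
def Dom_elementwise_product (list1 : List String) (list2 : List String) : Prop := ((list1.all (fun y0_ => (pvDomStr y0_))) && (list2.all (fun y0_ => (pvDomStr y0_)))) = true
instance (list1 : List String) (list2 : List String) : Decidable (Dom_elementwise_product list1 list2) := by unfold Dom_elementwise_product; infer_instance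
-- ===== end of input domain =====

-- B replaces A's 16-entry product table by the symplectic XOR encoding (I,X,Z,Y -> 0,1,2,3); same cost, more idiomatic.

-- ===== PORT A =====
-- A's product_table dict (string-pair keys, insertion order)
def pvProductTable : PySem.Dict (String × String) String :=
  PySem.Dict.ofList
  [(("I","I"),"I"), (("I","X"),"X"), (("I","Y"),"Y"), (("I","Z"),"Z"),
   (("X","I"),"X"), (("X","X"),"I"), (("X","Y"),"Z"), (("X","Z"),"Y"),
   (("Y","I"),"Y"), (("Y","X"),"Z"), (("Y","Y"),"I"), (("Y","Z"),"X"),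
   (("Z","I"),"Z"), (("Z","X"),"Y"), (("Z","Y"),"X"), (("Z","Z"),"I")]

-- A's for-loop over zip(list1,list2), appending table lookups; a missing key is Python's KeyError (none, excluded by Pre_)
def pvLoopA : List (String × String) → List String → Option (List String)
  | [], result => some result
  | p :: rest, result =>
    match pvProductTable.get? p with
    | none => none
    | some v => pvLoopA rest (result ++ [v])

def elementwise_product (list1 : List String) (list2 : List String) : Option (List String) :=
  if list1.length ≠ list2.length then none
  else pvLoopA (list1.zip list2) []

-- ===== PORT B =====
-- B's enc dict and dec string
def pvEnc : PySem.Dict String Int := PySem.Dict.ofList [("I",0), ("X",1), ("Z",2), ("Y",3)]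

-- one comprehension element: dec[enc[op1] ^ enc[op2]] (KeyError/IndexError = none, excluded by Pre_)
def pvStepB (p : String × String) : Option String :=
  (pvEnc.get? p.1).bind fun a =>
    (pvEnc.get? p.2).bind fun b =>
      (PySem.Str.pyGet? "IXZY" (PySem.Int.bxor a b)).map (fun c => String.ofList [c])  -- dec[code] is a 1-char string

def elementwise_product_alt (list1 : List String) (list2 : List String) : Option (List String) :=
  if list1.length ≠ list2.length then none
  else (list1.zip list2).mapM pvStepB

-- ===== PRECONDITION & SPEC =====
-- Pre_ excludes exactly the inputs where A raises KeyError: equal-length lists containing a non-Pauli string.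
def Pre_elementwise_product (list1 : List String) (list2 : List String) : Prop :=
  list1.length ≠ list2.length ∨
    ((∀ s ∈ list1, s = "I" ∨ s = "X" ∨ s = "Y" ∨ s = "Z") ∧
     (∀ s ∈ list2, s = "I" ∨ s = "X" ∨ s = "Y" ∨ s = "Z"))
instance (list1 : List String) (list2 : List String) : Decidable (Pre_elementwise_product list1 list2) := by
  unfold Pre_elementwise_product; infer_instance

def pvWitness_elementwise_product : List String × List String := (["X","Z","I"], ["Y","Z","X"])

def Spec_elementwise_product (list1 : List String) (list2 : List String) (out : Option (List String)) : Prop := out = elementwise_product_alt list1 list2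
instance (list1 : List String) (list2 : List String) (out : Option (List String)) : Decidable (Spec_elementwise_product list1 list2 out) := by unfold Spec_elementwise_product; infer_instance

-- ===== CLAIM (what is proved, stated in full; the proofs are below) =====
def Claim_equal_elementwise_product : Prop := ∀ (list1 : List String) (list2 : List String), Dom_elementwise_product list1 list2 → Pre_elementwise_product list1 list2 → Spec_elementwise_product list1 list2 (elementwise_product list1 list2)

-- ===== LEMMAS AND PROOFS =====

def pvValid (s : String) : Prop := s = "I" ∨ s = "X" ∨ s = "Y" ∨ s = "Z"

-- on valid operators, the table lookup equals B's XOR step (16 cases)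
theorem pv_table_eq_step (a b : String) (ha : pvValid a) (hb : pvValid b) :
    pvProductTable.get? (a, b) = pvStepB (a, b) := by
  rcases ha with rfl | rfl | rfl | rfl <;> rcases hb with rfl | rfl | rfl | rfl <;> decide

theorem pv_step_isSome (a b : String) (ha : pvValid a) (hb : pvValid b) :
    ∃ v, pvStepB (a, b) = some v := by
  rcases ha with rfl | rfl | rfl | rfl <;> rcases hb with rfl | rfl | rfl | rfl <;> exact ⟨_, rfl⟩

-- A's accumulator loop equals mapM of B's step, on valid pair lists
theorem pv_loop_eq_mapM (ps : List (String × String)) (acc : List String)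
    (h : ∀ p ∈ ps, pvValid p.1 ∧ pvValid p.2) :
    pvLoopA ps acc = (ps.mapM pvStepB).map (acc ++ ·) := by
  induction ps generalizing acc with
  | nil => simp [pvLoopA, List.mapM, List.mapM.loop]
  | cons p rest ih =>
    have hp := h p (List.mem_cons_self ..)
    obtain ⟨v, hv⟩ := pv_step_isSome p.1 p.2 hp.1 hp.2
    have ht : pvProductTable.get? p = some v := by
      rw [show p = (p.1, p.2) from rfl, pv_table_eq_step p.1 p.2 hp.1 hp.2]; exact hv
    have hrest : ∀ q ∈ rest, pvValid q.1 ∧ pvValid q.2 := fun q hq => h q (List.mem_cons_of_mem _ hq)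
    simp [pvLoopA, ht, hv, ih (acc ++ [v]) hrest, List.mapM_cons]
    cases rest.mapM pvStepB <;> simp

-- ===== VERDICT (by name: the statement is the Claim_ definition above) =====
theorem elementwise_product_spec : Claim_equal_elementwise_product := by
  intro list1 list2 _ hpre
  unfold Spec_elementwise_product elementwise_product elementwise_product_alt
  by_cases hlen : list1.length = list2.length
  · simp only [hlen, ne_eq, not_true_eq_false, if_false]
    rcases hpre with h | ⟨h1, h2⟩
    · exact absurd hlen h
    · have h : ∀ p ∈ list1.zip list2, pvValid p.1 ∧ pvValid p.2 := by
        intro p hp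
        obtain ⟨hp1, hp2⟩ := List.of_mem_zip hp
        exact ⟨h1 _ hp1, h2 _ hp2⟩
      rw [pv_loop_eq_mapM _ [] h]
      cases (list1.zip list2).mapM pvStepB <;> simp
  · simp [hlen]
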